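-- pv_equiv track=rewrite | github.com/sparkle-temp/TIMETABLE-GEN2 | mains works.py | otables
-- ===== SOURCE A (Python) =====
-- def otables(e,b,c):
--     l={}
--     for x in b:
--         for y in b[x]:
--             if y not in l:
--                 l[y]=[["","","","","","","","","",""],["","","","","","","","","",""],["","","","","","","","","",""],["","","","","","","","","",""],["","","","","","","","","",""]]
--
--     for x in c:
--         for y in c[x]:
--             if y not in l:
--                 l[y]=[["","","","","","","","","",""],["","","","","","","","","",""],["","","","","","","","","",""],["","","","","","","","","",""],["","","","","","","","","",""]]
--     l.pop('PED')
--     lp=[]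
--     for y in l:
--         for x in e:
--             for u in range(len(e[x])):
--                 for v in range(len(e[x][u])):
--                     if y in e[x][u][v]:
--                         if l[y][u][v]=="":
--                             l[y][u][v]=x
--                         else:
--                             if y not in lp:
--                                 lp.append(y)
--     return l,lp
-- ===== SOURCE B (Python) =====
-- def otables(e, b, c):
--     # key order = first occurrence among b's values then c's values, as in the original dict build
--     keys = list(dict.fromkeys(y for src in (b, c) for ys in src.values() for y in ys))
--     keys.remove('PED')
--     # invert e once: for every name, the list of (teacher, row, col) cells that mention it
--     occ = {}
--     for x in e:
--         for u, row in enumerate(e[x]):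
--             for v, cell in enumerate(row):
--                 for y in dict.fromkeys(cell):
--                     occ.setdefault(y, []).append((x, u, v))
--     l = {}
--     lp = []
--     for y in keys:
--         grid = [[""] * 10 for _ in range(5)]
--         conflict = False
--         for (x, u, v) in occ.get(y, ()):
--             if grid[u][v] == "":
--                 grid[u][v] = x
--             else:
--                 conflict = True
--         l[y] = grid
--         if conflict:
--             lp.append(y)
--     return l, lp
-- ===== Notes on version B (the rewrite author's own statement) =====
-- stated objective: faster
-- what changed: A rescans every cell of e once per timetable key with an inner membership test; B inverts e in a single pass into an occurrence index (name -> list of (teacher,row,col) cells mentioning it) and then fills each key's fresh grid by replaying only that key's occurrence list, so the per-key scan of all cells disappears.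
import Mathlib
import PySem

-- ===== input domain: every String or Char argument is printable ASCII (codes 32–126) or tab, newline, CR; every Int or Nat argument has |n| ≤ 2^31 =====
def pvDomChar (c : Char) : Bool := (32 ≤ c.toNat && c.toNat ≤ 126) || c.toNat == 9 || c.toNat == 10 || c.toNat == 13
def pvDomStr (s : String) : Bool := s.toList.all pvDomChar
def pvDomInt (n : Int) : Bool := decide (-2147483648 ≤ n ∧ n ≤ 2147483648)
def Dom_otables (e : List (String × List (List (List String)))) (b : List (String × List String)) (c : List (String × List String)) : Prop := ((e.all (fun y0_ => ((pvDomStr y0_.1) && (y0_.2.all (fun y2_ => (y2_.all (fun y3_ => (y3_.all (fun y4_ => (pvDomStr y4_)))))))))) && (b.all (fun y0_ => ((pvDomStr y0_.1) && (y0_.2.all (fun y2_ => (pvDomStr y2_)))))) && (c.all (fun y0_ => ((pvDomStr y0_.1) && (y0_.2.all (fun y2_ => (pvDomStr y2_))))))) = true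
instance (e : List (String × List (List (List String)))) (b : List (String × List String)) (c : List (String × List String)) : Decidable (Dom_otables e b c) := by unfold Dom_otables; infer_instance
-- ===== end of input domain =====

-- B replaces A's per-key rescan of all cells of e by a one-pass inverted occurrence index
-- (name -> list of (teacher,row,col) cells mentioning it) replayed per key (objective: faster).

-- ===== PORT A =====
-- A-side helpers: the mutable dict-of-grids l and its operations
abbrev PvG := List (List String)
abbrev PvL := List (String × PvG)

def pvBlank : PvG := [["","","","","","","","","",""],["","","","","","","","","",""],["","","","","","","","","",""],["","","","","","","","","",""],["","","","","","","","","",""]]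

def dGet (l : PvL) (y : String) : PvG := ((l.find? (fun q => q.1 == y)).map Prod.snd).getD []
def gGet (g : PvG) (u v : Int) : String := PySem.List.pyGetD (PySem.List.pyGetD g u []) v ""
def setCellG (g : PvG) (u v : Int) (x : String) : PvG := g.set u.toNat ((PySem.List.pyGetD g u []).set v.toNat x)
def dSetCell (l : PvL) (y : String) (u v : Int) (x : String) : PvL := l.map (fun q => if q.1 == y then (q.1, setCellG q.2 u v x) else q)
def dContains (l : PvL) (y : String) : Bool := l.any (fun q => q.1 == y)

-- A's grid initialisation: keys from b's and c's values, grids all blank, then pop 'PED'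
def pvInit (b : List (String × List String)) (c : List (String × List String)) : PvL :=
  let l0 := (PySem.Dict.ofList b).items.foldl (fun l p => p.2.foldl (fun l y => if dContains l y then l else l ++ [(y, pvBlank)]) l) ([] : PvL)
  let l1 := (PySem.Dict.ofList c).items.foldl (fun l p => p.2.foldl (fun l y => if dContains l y then l else l ++ [(y, pvBlank)]) l) l0
  l1.eraseP (fun q => q.1 == "PED")

def otables (e : List (String × List (List (List String)))) (b : List (String × List String)) (c : List (String × List String)) : (List (String × List (List String))) × List String :=
  let eI := (PySem.Dict.ofList e).items
  let l2 := pvInit b c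
  (l2.map Prod.fst).foldl (fun st y =>
    eI.foldl (fun st p =>
      (PySem.List.enumerate p.2).foldl (fun st ur =>
        (PySem.List.enumerate ur.2).foldl (fun st vc =>
          if vc.2.contains y then
            if gGet (dGet st.1 y) ur.1 vc.1 == "" then (dSetCell st.1 y ur.1 vc.1 p.1, st.2)
            else (st.1, if st.2.contains y then st.2 else st.2 ++ [y])
          else st) st) st) st) (l2, ([] : List String))

-- ===== PORT B =====
-- B-side helpers: a fresh blank grid per key and its cell read/write
def bBlank : PvG := List.replicate 5 (List.replicate 10 "")
def bCell (g : PvG) (u v : Int) : String := PySem.List.pyGetD (PySem.List.pyGetD g u []) v ""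
def bPut (g : PvG) (u v : Int) (x : String) : PvG := g.set u.toNat ((PySem.List.pyGetD g u []).set v.toNat x)

def otables_alt (e : List (String × List (List (List String)))) (b : List (String × List String)) (c : List (String × List String)) : (List (String × List (List String))) × List String :=
  let keys0 := PySem.List.dedup (((PySem.Dict.ofList b).values ++ (PySem.Dict.ofList c).values).flatten)
  match PySem.List.remove? keys0 "PED" with
  | none => ([], [])   -- keys.remove('PED') raises ValueError: outside Pre_
  | some keys =>
    let occ := (PySem.Dict.ofList e).items.foldl (fun occ p =>
      (PySem.List.enumerate p.2).foldl (fun occ ur =>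
        (PySem.List.enumerate ur.2).foldl (fun occ vc =>
          (PySem.List.dedup vc.2).foldl (fun occ y =>
            occ.modify y [] (· ++ [(p.1, ur.1, vc.1)])) occ) occ) occ)
      (PySem.Dict.empty : PySem.Dict String (List (String × Int × Int)))
    keys.foldl (fun st y =>
      let r := (occ.getD y []).foldl (fun s t =>
        if bCell s.1 t.2.1 t.2.2 == "" then (bPut s.1 t.2.1 t.2.2 t.1, s.2) else (s.1, true))
        (bBlank, false)
      (st.1 ++ [(y, r.1)], if r.2 then st.2 ++ [y] else st.2)) (([] : PvL), ([] : List String))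

-- ===== PRECONDITION & SPEC =====
-- Pre_ excludes exactly the inputs on which A raises: a KeyError when 'PED' is not among the values of
-- b and c (so l.pop('PED') fails), and an IndexError when some timetable key occurs in a cell of e at
-- row index ≥ 5 or column index ≥ 10 (the grids have 5 rows of 10).
def Pre_otables (e : List (String × List (List (List String)))) (b : List (String × List String)) (c : List (String × List String)) : Prop :=
  ("PED" ∈ ((PySem.Dict.ofList b).values ++ (PySem.Dict.ofList c).values).flatten) ∧
  (∀ p ∈ (PySem.Dict.ofList e).items, ∀ ur ∈ PySem.List.enumerate p.2, ∀ vc ∈ PySem.List.enumerate ur.2,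
    (∃ y ∈ ((PySem.Dict.ofList b).values ++ (PySem.Dict.ofList c).values).flatten, y ≠ "PED" ∧ y ∈ vc.2) →
    (ur.1 < 5 ∧ vc.1 < 10))
instance (e : List (String × List (List (List String)))) (b : List (String × List String)) (c : List (String × List String)) : Decidable (Pre_otables e b c) := by unfold Pre_otables; infer_instance

def pvWitness_otables : (List (String × List (List (List String)))) × (List (String × List String)) × (List (String × List String)) :=
  ([("X", [[["a"]]])], [("k", ["PED", "a"])], [])

def Spec_otables (e : List (String × List (List (List String)))) (b : List (String × List String)) (c : List (String × List String)) (out : (List (String × List (List String))) × List String) : Prop := out = otables_alt e b c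
instance (e : List (String × List (List (List String)))) (b : List (String × List String)) (c : List (String × List String)) (out : (List (String × List (List String))) × List String) : Decidable (Spec_otables e b c out) := by unfold Spec_otables; infer_instance

-- ===== CLAIM (what is proved, stated in full; the proofs are below) =====
def Claim_equal_otables : Prop := ∀ (e : List (String × List (List (List String)))) (b : List (String × List String)) (c : List (String × List String)), Dom_otables e b c → Pre_otables e b c → Spec_otables e b c (otables e b c)

-- ===== LEMMAS AND PROOFS =====

abbrev PvT := String × Int × Int × List String

-- per-key sequential cell-filling step (the common core both programs execute for one key)
def stepK (y : String) (s : PvG × Bool) (t : PvT) : PvG × Bool :=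
  if t.2.2.2.contains y then
    if gGet s.1 t.2.1 t.2.2.1 == "" then (setCellG s.1 t.2.1 t.2.2.1 t.1, s.2) else (s.1, true)
  else s

def stepA (y : String) (st : PvL × List String) (t : PvT) : PvL × List String :=
  if t.2.2.2.contains y then
    if gGet (dGet st.1 y) t.2.1 t.2.2.1 == "" then (dSetCell st.1 y t.2.1 t.2.2.1 t.1, st.2)
    else (st.1, if st.2.contains y then st.2 else st.2 ++ [y])
  else st

lemma setCellG_nil (u v : Int) (x : String) : setCellG [] u v x = [] := by
  simp [setCellG, PySem.List.pyGetD]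

lemma dGet_nil (z : String) : dGet [] z = [] := rfl

lemma dGet_cons (k : String) (g : PvG) (t : PvL) (z : String) :
    dGet ((k, g) :: t) z = if k = z then g else dGet t z := by
  by_cases h : k = z <;> simp [dGet, h]

lemma dSetCell_cons (k : String) (g : PvG) (t : PvL) (y : String) (u v : Int) (x : String) :
    dSetCell ((k, g) :: t) y u v x = (if k = y then (k, setCellG g u v x) else (k, g)) :: dSetCell t y u v x := by
  by_cases h : k = y <;> simp [dSetCell, h]

lemma keys_dSetCell (l : PvL) (y : String) (u v : Int) (x : String) :
    (dSetCell l y u v x).map Prod.fst = l.map Prod.fst := by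
  simp only [dSetCell, List.map_map]
  apply List.map_congr_left
  intro q _
  by_cases h : q.1 = y <;> simp [h]

lemma dGet_dSetCell (l : PvL) (y : String) (u v : Int) (x : String) (z : String) :
    dGet (dSetCell l y u v x) z = if z = y then setCellG (dGet l y) u v x else dGet l z := by
  induction l with
  | nil => by_cases hzy : z = y <;> simp [dGet_nil, dSetCell, hzy, setCellG_nil]
  | cons q t ih =>
    obtain ⟨k, g⟩ := q
    rw [dSetCell_cons]
    by_cases hky : k = y
    · subst hky
      rw [if_pos rfl, dGet_cons]
      by_cases hkz : k = z
      · subst hkz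
        rw [if_pos rfl, if_pos rfl, dGet_cons, if_pos rfl]
      · have hzk : ¬ z = k := fun h => hkz h.symm
        rw [if_neg hkz, ih, if_neg hzk, if_neg hzk, dGet_cons, if_neg hkz]
    · rw [if_neg hky, dGet_cons]
      by_cases hkz : k = z
      · subst hkz
        rw [if_pos rfl]
        have hzy : ¬ k = y := hky
        rw [if_neg hzy, dGet_cons, if_pos rfl]
      · rw [if_neg hkz, ih]
        by_cases hzy : z = y
        · rw [if_pos hzy, if_pos hzy, dGet_cons, if_neg hky]
        · rw [if_neg hzy, if_neg hzy, dGet_cons, if_neg hkz]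

lemma dContains_keys (m : PvL) (y : String) : dContains m y = (m.map Prod.fst).any (fun k => k == y) := by
  rw [List.any_map]; rfl

lemma dContains_iff (l : PvL) (y : String) : dContains l y = true ↔ y ∈ l.map Prod.fst := by
  rw [dContains_keys]
  simp

lemma recon : ∀ (l : PvL), (l.map Prod.fst).Nodup → l = (l.map Prod.fst).map (fun y => (y, dGet l y)) := by
  intro l
  induction l with
  | nil => intro _; rfl
  | cons q t ih =>
    intro h
    obtain ⟨k, g⟩ := q
    simp only [List.map_cons, List.nodup_cons] at h ⊢
    rw [show dGet ((k, g) :: t) k = g from by rw [dGet_cons, if_pos rfl]]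
    congr 1
    have ht := ih h.2
    conv_lhs => rw [ht]
    apply List.map_congr_left
    intro z hz
    have hkz : ¬ k = z := by rintro rfl; exact h.1 hz
    rw [dGet_cons, if_neg hkz]

lemma kSplit (y : String) : ∀ (Tl : List PvT) (g : PvG) (f : Bool),
    Tl.foldl (stepK y) (g, f) = ((Tl.foldl (stepK y) (g, false)).1, f || (Tl.foldl (stepK y) (g, false)).2) := by
  intro Tl
  induction Tl with
  | nil => intro g f; cases f <;> simp
  | cons t r ih =>
    intro g f
    simp only [List.foldl_cons]
    by_cases h1 : t.2.2.2.contains y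
    · by_cases h2 : gGet g t.2.1 t.2.2.1 == ""
      · simp only [stepK, if_pos h1, if_pos h2]
        exact ih _ f
      · simp only [stepK, if_pos h1, if_neg h2]
        rw [ih _ true, ih _ false]
        simp
    · simp only [stepK, if_neg h1]
      exact ih g f

lemma lemA1 (y₀ : String) : ∀ (Tl : List PvT) (l : PvL) (lp : List String) (g : PvG) (f : Bool),
    dGet l y₀ = g → lp.contains y₀ = f →
    ((Tl.foldl (stepA y₀) (l, lp)).1.map Prod.fst = l.map Prod.fst) ∧
    dGet (Tl.foldl (stepA y₀) (l, lp)).1 y₀ = (Tl.foldl (stepK y₀) (g, f)).1 ∧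
    (∀ z, z ≠ y₀ → dGet (Tl.foldl (stepA y₀) (l, lp)).1 z = dGet l z) ∧
    (Tl.foldl (stepA y₀) (l, lp)).2 = (if f then lp else lp ++ (if (Tl.foldl (stepK y₀) (g, f)).2 then [y₀] else [])) := by
  intro Tl
  induction Tl with
  | nil =>
    intro l lp g f hg hf
    refine ⟨rfl, hg, fun z _ => rfl, ?_⟩
    cases f <;> simp
  | cons t r ih =>
    intro l lp g f hg hf
    simp only [List.foldl_cons]
    by_cases h1 : t.2.2.2.contains y₀
    · by_cases h2 : gGet g t.2.1 t.2.2.1 == ""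
      · -- empty cell: write
        have hA : stepA y₀ (l, lp) t = (dSetCell l y₀ t.2.1 t.2.2.1 t.1, lp) := by
          simp only [stepA]; rw [hg, if_pos h1, if_pos h2]
        have hK : stepK y₀ (g, f) t = (setCellG g t.2.1 t.2.2.1 t.1, f) := by
          simp only [stepK]; rw [if_pos h1, if_pos h2]
        simp only [hA, hK]
        have hg' : dGet (dSetCell l y₀ t.2.1 t.2.2.1 t.1) y₀ = setCellG g t.2.1 t.2.2.1 t.1 := by
          rw [dGet_dSetCell, if_pos rfl, hg]
        obtain ⟨c1, c2, c3, c4⟩ := ih (dSetCell l y₀ t.2.1 t.2.2.1 t.1) lp _ f hg' hf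
        refine ⟨by rw [c1, keys_dSetCell], c2, ?_, c4⟩
        intro z hz
        rw [c3 z hz, dGet_dSetCell, if_neg hz]
      · -- conflict
        have hK : stepK y₀ (g, f) t = (g, true) := by
          simp only [stepK]; rw [if_pos h1, if_neg h2]
        simp only [hK]
        have hflag : (r.foldl (stepK y₀) (g, true)).2 = true := by
          rw [kSplit]; simp
        by_cases hfv : f = true
        · subst hfv
          have hA : stepA y₀ (l, lp) t = (l, lp) := by
            simp only [stepA]; rw [hg, if_pos h1, if_neg h2, hf]; simp
          simp only [hA]
          obtain ⟨c1, c2, c3, c4⟩ := ih l lp g true hg hf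
          exact ⟨c1, c2, c3, by rw [c4]; simp⟩
        · have hf0 : f = false := by cases f <;> simp_all
          subst hf0
          have hA : stepA y₀ (l, lp) t = (l, lp ++ [y₀]) := by
            simp only [stepA]; rw [hg, if_pos h1, if_neg h2, hf]; simp
          simp only [hA]
          have hf' : (lp ++ [y₀]).contains y₀ = true := by simp
          obtain ⟨c1, c2, c3, c4⟩ := ih l (lp ++ [y₀]) g true hg hf'
          refine ⟨c1, c2, c3, ?_⟩
          rw [c4]
          simp [hflag]
    · have hA : stepA y₀ (l, lp) t = (l, lp) := by
        simp only [stepA]; rw [if_neg h1]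
      have hK : stepK y₀ (g, f) t = (g, f) := by
        simp only [stepK]; rw [if_neg h1]
      simp only [hA, hK]
      exact ih l lp g f hg hf

lemma lemA2 (T : List PvT) : ∀ (ys : List String) (l : PvL) (lp : List String), ys.Nodup →
    (∀ y ∈ ys, lp.contains y = false) →
    ((ys.foldl (fun st y => T.foldl (stepA y) st) (l, lp)).1.map Prod.fst = l.map Prod.fst) ∧
    (∀ z, dGet (ys.foldl (fun st y => T.foldl (stepA y) st) (l, lp)).1 z =
      if z ∈ ys then (T.foldl (stepK z) (dGet l z, false)).1 else dGet l z) ∧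
    (ys.foldl (fun st y => T.foldl (stepA y) st) (l, lp)).2 =
      lp ++ ys.filter (fun y => (T.foldl (stepK y) (dGet l y, false)).2) := by
  intro ys
  induction ys with
  | nil =>
    intro l lp _ _
    exact ⟨rfl, fun z => by simp, by simp⟩
  | cons y₀ t ih =>
    intro l lp hnd hlp
    have hnd' := hnd.of_cons
    have hy₀t : y₀ ∉ t := (List.nodup_cons.mp hnd).1
    simp only [List.foldl_cons]
    have hf0 : lp.contains y₀ = false := hlp y₀ (by simp)
    obtain ⟨a1, a2, a3, a4⟩ := lemA1 y₀ T l lp (dGet l y₀) false rfl hf0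
    set st₁ := T.foldl (stepA y₀) (l, lp) with hst₁
    have hlp' : ∀ y ∈ t, st₁.2.contains y = false := by
      intro y hy
      have hyy₀ : y ≠ y₀ := by rintro rfl; exact hy₀t hy
      have hylp : y ∉ lp := by simpa using hlp y (List.mem_cons_of_mem _ hy)
      rw [a4]
      cases hfl : (T.foldl (stepK y₀) (dGet l y₀, false)).2 <;> simp [hylp, hyy₀]
    have : st₁ = (st₁.1, st₁.2) := rfl
    rw [this]
    obtain ⟨b1, b2, b3⟩ := ih st₁.1 st₁.2 hnd' hlp'
    refine ⟨by rw [b1, a1], ?_, ?_⟩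
    · intro z
      by_cases hz : z = y₀
      · subst hz
        rw [b2 z]
        by_cases hzt : z ∈ t
        · exact absurd hzt hy₀t
        · simp only [if_neg hzt, List.mem_cons, true_or, if_pos]
          rw [a2]
      · rw [b2 z]
        by_cases hzt : z ∈ t
        · rw [if_pos hzt, if_pos (by simp [hzt])]
          rw [a3 z hz]
        · rw [if_neg hzt, if_neg (by simp [hz, hzt]), a3 z hz]
    · rw [b3, a4, if_neg Bool.false_ne_true]
      have hfilt : t.filter (fun y => (T.foldl (stepK y) (dGet st₁.1 y, false)).2) =
          t.filter (fun y => (T.foldl (stepK y) (dGet l y, false)).2) := by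
        apply List.filter_congr
        intro y hy
        have hyy₀ : y ≠ y₀ := by rintro rfl; exact hy₀t hy
        rw [a3 y hyy₀]
      rw [hfilt]
      rw [List.filter_cons]
      cases hc : (T.foldl (stepK y₀) (dGet l y₀, false)).2 <;> simp

-- keys of the fold: the same key appended at most once, in first-occurrence order
lemma keysFold : ∀ (ys : List String) (l : PvL),
    (ys.foldl (fun l y => if dContains l y then l else l ++ [(y, pvBlank)]) l).map Prod.fst =
    ys.foldl PySem.Set.add (l.map Prod.fst) := by
  intro ys
  induction ys with
  | nil => intro l; rfl
  | cons y t ih =>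
    intro l
    simp only [List.foldl_cons]
    rw [show PySem.Set.add (l.map Prod.fst) y =
        (if dContains l y then l else l ++ [(y, pvBlank)]).map Prod.fst from ?_, ih]
    by_cases h : y ∈ l.map Prod.fst
    · rw [if_pos ((dContains_iff l y).mpr h)]
      simp [PySem.Set.add, PySem.Set.contains, h]
    · rw [if_neg (fun hc => h ((dContains_iff l y).mp hc))]
      simp [PySem.Set.add, PySem.Set.contains, h]

lemma nd_outer : ∀ (ps : List (String × List String)) (l : PvL), (l.map Prod.fst).Nodup →
    ((ps.foldl (fun l p => p.2.foldl (fun l y => if dContains l y then l else l ++ [(y, pvBlank)]) l) l).map Prod.fst).Nodup := by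
  intro ps
  induction ps with
  | nil => intro l h; exact h
  | cons p t ih =>
    intro l h
    simp only [List.foldl_cons]
    apply ih
    rw [keysFold]
    exact PySem.Set.nodup_update _ _ h

lemma nodup_keys_pvInit (b c : List (String × List String)) : ((pvInit b c).map Prod.fst).Nodup := by
  unfold pvInit
  have h1 := nd_outer (PySem.Dict.ofList b).items [] List.nodup_nil
  have h2 := nd_outer (PySem.Dict.ofList c).items _ h1
  exact h2.sublist (List.Sublist.map Prod.fst (List.eraseP_sublist))

-- every grid stored by the initialisation is the blank grid
lemma snd_fold_inner : ∀ (ys : List String) (l : PvL), (∀ q ∈ l, q.2 = pvBlank) →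
    ∀ q ∈ ys.foldl (fun l y => if dContains l y then l else l ++ [(y, pvBlank)]) l, q.2 = pvBlank := by
  intro ys
  induction ys with
  | nil => intro l h; exact h
  | cons y t ih =>
    intro l h
    simp only [List.foldl_cons]
    apply ih
    by_cases hc : dContains l y
    · rw [if_pos hc]; exact h
    · rw [if_neg hc]
      intro q hq
      rcases List.mem_append.mp hq with h1 | h2
      · exact h q h1
      · simp at h2; rw [h2]

lemma snd_fold_outer : ∀ (ps : List (String × List String)) (l : PvL), (∀ q ∈ l, q.2 = pvBlank) →
    ∀ q ∈ ps.foldl (fun l p => p.2.foldl (fun l y => if dContains l y then l else l ++ [(y, pvBlank)]) l) l, q.2 = pvBlank := by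
  intro ps
  induction ps with
  | nil => intro l h; exact h
  | cons p t ih =>
    intro l h
    simp only [List.foldl_cons]
    exact ih _ (snd_fold_inner p.2 l h)

lemma snd_pvInit (b c : List (String × List String)) : ∀ q ∈ pvInit b c, q.2 = pvBlank := by
  unfold pvInit
  intro q hq
  have h1 := snd_fold_outer (PySem.Dict.ofList b).items [] (by intro q h; cases h)
  have h2 := snd_fold_outer (PySem.Dict.ofList c).items _ h1
  exact h2 q (List.eraseP_sublist.subset hq)

lemma dGet_blank (l : PvL) (hb : ∀ q ∈ l, q.2 = pvBlank) (y : String) (hy : y ∈ l.map Prod.fst) :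
    dGet l y = pvBlank := by
  rcases hf : l.find? (fun q => q.1 == y) with _ | q
  · exfalso
    rcases List.mem_map.mp hy with ⟨q, hq, hqy⟩
    have := List.find?_eq_none.mp hf q hq
    simp [hqy] at this
  · have hmem := List.mem_of_find?_eq_some hf
    simp [dGet, hf, hb q hmem]

-- V: the flattened values of b then c; the initial keys are dedup V minus the first 'PED'
def pvVals (b c : List (String × List String)) : List String :=
  ((PySem.Dict.ofList b).values ++ (PySem.Dict.ofList c).values).flatten

lemma keys_pvInit (b c : List (String × List String)) :
    (pvInit b c).map Prod.fst = (PySem.List.dedup (pvVals b c)).erase "PED" := by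
  unfold pvInit
  have hmapfst : ∀ (l : PvL), (l.eraseP (fun q => q.1 == "PED")).map Prod.fst
      = (l.map Prod.fst).eraseP (fun k => k == "PED") := by
    intro l
    induction l with
    | nil => rfl
    | cons h t ih => by_cases hp : h.1 == "PED" <;> simp [hp, ih]
  rw [hmapfst]
  rw [show (∀ (l : List String), l.eraseP (fun k => k == "PED") = l.erase "PED") from
    fun l => (List.erase_eq_eraseP' "PED" l).symm]
  congr 1
  -- keys of the two nested folds = dedup of the flattened values
  have hb : ∀ (ps : List (String × List String)) (l : PvL),
      (ps.foldl (fun l p => p.2.foldl (fun l y => if dContains l y then l else l ++ [(y, pvBlank)]) l) l).map Prod.fst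
      = (ps.flatMap Prod.snd).foldl PySem.Set.add (l.map Prod.fst) := by
    intro ps
    induction ps with
    | nil => intro l; rfl
    | cons p t ih =>
      intro l
      simp only [List.foldl_cons, List.flatMap_cons, List.foldl_append]
      rw [ih, keysFold]
  rw [hb, hb]
  simp only [List.map_nil]
  rw [show PySem.List.dedup (pvVals b c) = (pvVals b c).foldl PySem.Set.add [] from by
    simp [pysem, PySem.Set.ofList_eq_foldl]]
  unfold pvVals
  rw [show ((PySem.Dict.ofList b).values ++ (PySem.Dict.ofList c).values).flatten
      = (PySem.Dict.ofList b).items.flatMap Prod.snd ++ (PySem.Dict.ofList c).items.flatMap Prod.snd from by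
    simp [PySem.Dict.values, List.flatMap]]
  rw [List.foldl_append]

-- ===== B-side lemmas =====

def pvTrips (eI : List (String × List (List (List String)))) : List PvT :=
  eI.flatMap (fun p => (PySem.List.enumerate p.2).flatMap (fun ur => (PySem.List.enumerate ur.2).map (fun vc => (p.1, ur.1, vc.1, vc.2))))

lemma bridgeA (y : String) (eI : List (String × List (List (List String)))) (st : PvL × List String) :
    eI.foldl (fun st p =>
      (PySem.List.enumerate p.2).foldl (fun st ur =>
        (PySem.List.enumerate ur.2).foldl (fun st vc =>
          if vc.2.contains y then
            if gGet (dGet st.1 y) ur.1 vc.1 == "" then (dSetCell st.1 y ur.1 vc.1 p.1, st.2)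
            else (st.1, if st.2.contains y then st.2 else st.2 ++ [y])
          else st) st) st) st = (pvTrips eI).foldl (stepA y) st := by
  simp only [pvTrips, List.foldl_flatMap, List.foldl_map]
  rfl

-- the inverted index: (name, occurrence) pairs in scan order
def pvPairs (eI : List (String × List (List (List String)))) : List (String × (String × Int × Int)) :=
  (pvTrips eI).flatMap (fun t => (PySem.List.dedup t.2.2.2).map (fun y => (y, (t.1, t.2.1, t.2.2.1))))

lemma bridgeOcc (eI : List (String × List (List (List String)))) :
    eI.foldl (fun occ p =>
      (PySem.List.enumerate p.2).foldl (fun occ ur =>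
        (PySem.List.enumerate ur.2).foldl (fun occ vc =>
          (PySem.List.dedup vc.2).foldl (fun occ y =>
            occ.modify y [] (· ++ [(p.1, ur.1, vc.1)])) occ) occ) occ)
      (PySem.Dict.empty : PySem.Dict String (List (String × Int × Int)))
    = (pvPairs eI).foldl (fun d q => d.modify q.1 [] (· ++ [q.2])) PySem.Dict.empty := by
  simp only [pvPairs, pvTrips, List.foldl_flatMap, List.foldl_map]

-- a flatMap producing one pair per matching triple is the filtered, mapped scan
lemma flatMap_if_key (y : String) : ∀ (L : List PvT),
    L.flatMap (fun t => if t.2.2.2.contains y then [(y, (t.1, t.2.1, t.2.2.1))] else [])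
    = (L.filter (fun t => t.2.2.2.contains y)).map (fun t => (y, (t.1, t.2.1, t.2.2.1))) := by
  intro L
  induction L with
  | nil => rfl
  | cons h t ih =>
    simp only [List.flatMap_cons, List.filter_cons]
    by_cases hp : h.2.2.2.contains y
    · rw [if_pos hp, if_pos hp, List.singleton_append, List.map_cons, ih]
    · rw [if_neg hp, if_neg hp, List.nil_append, ih]

-- the occurrence list of y is exactly the per-key subsequence of the scan
lemma pairs_for_key (eI : List (String × List (List (List String)))) (y : String) :
    ((pvPairs eI).filter (fun q => q.1 == y)).map Prod.snd
    = ((pvTrips eI).filter (fun t => t.2.2.2.contains y)).map (fun t => (t.1, t.2.1, t.2.2.1)) := by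
  unfold pvPairs
  rw [List.filter_flatMap]
  have hper : ∀ (t : PvT),
      (((PySem.List.dedup t.2.2.2).map (fun y' => (y', (t.1, t.2.1, t.2.2.1)))).filter (fun q => q.1 == y))
      = if t.2.2.2.contains y then [(y, (t.1, t.2.1, t.2.2.1))] else [] := by
    intro t
    rw [List.filter_map]
    rw [show ((PySem.List.dedup t.2.2.2).filter ((fun q : String × (String × Int × Int) => q.1 == y) ∘ (fun y' => (y', (t.1, t.2.1, t.2.2.1))))) = (PySem.List.dedup t.2.2.2).filter (fun y' => y' == y) from rfl]
    rw [List.filter_beq]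
    by_cases hm : y ∈ t.2.2.2
    · rw [List.count_eq_one_of_mem (PySem.List.nodup_dedup _) ((PySem.List.mem_dedup _ _).mpr hm)]
      simp [hm]
    · rw [List.count_eq_zero.mpr (fun hc => hm ((PySem.List.mem_dedup _ _).mp hc))]
      simp [hm]
  rw [List.flatMap_congr (fun t _ => hper t), flatMap_if_key, List.map_map]
  rfl

-- replaying the per-key occurrence list is the per-key step over the full scan
lemma replayEq (y : String) (T : List PvT) (g : PvG) (f : Bool) :
    ((T.filter (fun t => t.2.2.2.contains y)).map (fun t => (t.1, t.2.1, t.2.2.1))).foldl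
      (fun s t => if bCell s.1 t.2.1 t.2.2 == "" then (bPut s.1 t.2.1 t.2.2 t.1, s.2) else (s.1, true)) (g, f)
    = T.foldl (stepK y) (g, f) := by
  rw [List.foldl_map, ← PySem.List.foldl_if_eq_foldl_filter (p := fun t : PvT => t.2.2.2.contains y)]
  rfl

lemma main_eq (e : List (String × List (List (List String)))) (b : List (String × List String)) (c : List (String × List String)) (hped : "PED" ∈ pvVals b c) :
    otables e b c = otables_alt e b c := by
  have hnd := nodup_keys_pvInit b c
  have hA : otables e b c =
      ((pvInit b c).map Prod.fst).foldl (fun st y => (pvTrips ((PySem.Dict.ofList e).items)).foldl (stepA y) st) (pvInit b c, ([] : List String)) := by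
    unfold otables
    simp only [bridgeA]
  -- B reduced: the ValueError branch is impossible and the occurrence replay is the per-key scan
  have hm : "PED" ∈ PySem.List.dedup (pvVals b c) := (PySem.List.mem_dedup _ _).mpr hped
  have hrem := PySem.List.remove?_eq_some_erase (PySem.List.dedup (pvVals b c)) "PED" hm
  have hkeys : (PySem.List.dedup (pvVals b c)).erase "PED" = (pvInit b c).map Prod.fst :=
    (keys_pvInit b c).symm
  have hocc : ∀ y : String,
      ((((PySem.Dict.ofList e).items.foldl (fun occ p =>
          (PySem.List.enumerate p.2).foldl (fun occ ur =>
            (PySem.List.enumerate ur.2).foldl (fun occ vc =>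
              (PySem.List.dedup vc.2).foldl (fun occ y =>
                occ.modify y [] (· ++ [(p.1, ur.1, vc.1)])) occ) occ) occ)
          (PySem.Dict.empty : PySem.Dict String (List (String × Int × Int)))).getD y []).foldl
        (fun s t => if bCell s.1 t.2.1 t.2.2 == "" then (bPut s.1 t.2.1 t.2.2 t.1, s.2) else (s.1, true))
        (bBlank, false))
      = (pvTrips ((PySem.Dict.ofList e).items)).foldl (stepK y) (pvBlank, false) := by
    intro y
    rw [bridgeOcc, PySem.Dict.getD_foldl_modify_append, PySem.Dict.getD_empty, List.nil_append,
      pairs_for_key, show bBlank = pvBlank from rfl, replayEq]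
  have hB : otables_alt e b c =
      (((pvInit b c).map Prod.fst).map (fun y => (y, ((pvTrips ((PySem.Dict.ofList e).items)).foldl (stepK y) (pvBlank, false)).1)),
       ((pvInit b c).map Prod.fst).filter (fun y => ((pvTrips ((PySem.Dict.ofList e).items)).foldl (stepK y) (pvBlank, false)).2)) := by
    have hrem2 : PySem.List.remove? (PySem.List.dedup (((PySem.Dict.ofList b).values ++ (PySem.Dict.ofList c).values).flatten)) "PED"
        = some ((PySem.List.dedup (pvVals b c)).erase "PED") := hrem
    unfold otables_alt
    simp only [hrem2]
    simp only [hocc, hkeys]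
    rw [PySem.List.foldl_prod_mk
        (f := fun acc y => acc ++ [(y, ((pvTrips ((PySem.Dict.ofList e).items)).foldl (stepK y) (pvBlank, false)).1)])
        (g := fun acc y => if ((pvTrips ((PySem.Dict.ofList e).items)).foldl (stepK y) (pvBlank, false)).2 then acc ++ [y] else acc)]
    rw [PySem.List.foldl_append_singleton_eq_map, PySem.List.foldl_append_if_eq_filter, List.nil_append, List.nil_append]
  rw [hA, hB]
  set T := pvTrips ((PySem.Dict.ofList e).items) with hT
  set l2 := pvInit b c with hl2
  set ks := l2.map Prod.fst with hks
  obtain ⟨a1, a2, a3⟩ := lemA2 T ks l2 [] hnd (fun y _ => rfl)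
  have hblank : ∀ y ∈ ks, dGet l2 y = pvBlank := fun y hy => dGet_blank l2 (snd_pvInit b c) y hy
  set rA := ks.foldl (fun st y => T.foldl (stepA y) st) (l2, ([] : List String)) with hrA
  have hfst : rA.1 = ks.map (fun y => (y, (T.foldl (stepK y) (pvBlank, false)).1)) := by
    have hreconA : rA.1 = (rA.1.map Prod.fst).map (fun y => (y, dGet rA.1 y)) :=
      recon rA.1 (by rw [a1]; exact hnd)
    rw [hreconA, a1]
    apply List.map_congr_left
    intro y hy
    rw [a2 y, if_pos hy, hblank y hy]
  have hsnd : rA.2 = ks.filter (fun y => (T.foldl (stepK y) (pvBlank, false)).2) := by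
    rw [a3, List.nil_append]
    apply List.filter_congr
    intro y hy
    rw [hblank y hy]
  exact Prod.ext hfst hsnd

-- ===== VERDICT (by name: the statement is the Claim_ definition above) =====
theorem otables_spec : Claim_equal_otables := by
  intro e b c _ hpre
  unfold Spec_otables
  exact main_eq e b c hpre.1
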